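-- pv_equiv track=rewrite | github.com/Sunzzx/auto-job-applier | src/job_agent/workflow.py | _normalize_job_url
-- ===== SOURCE A (Python) =====
-- def _normalize_job_url(url: str) -> str:
--     replacements = {
--         "https://www.boards.greenhouse.io/": "https://boards.greenhouse.io/",
--         "http://www.boards.greenhouse.io/": "https://boards.greenhouse.io/",
--         "https://www.job-boards.greenhouse.io/": "https://job-boards.greenhouse.io/",
--         "http://www.job-boards.greenhouse.io/": "https://job-boards.greenhouse.io/",
--     }
--     normalized = url.strip()
--     for old, new in replacements.items():
--         if normalized.startswith(old):
--             return new + normalized[len(old):]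
--     return normalized
-- ===== SOURCE B (Python) =====
-- def _normalize_job_url(url: str) -> str:
--     s = url.strip()
--     if s.startswith("https://www."):
--         scheme_len = 12
--     elif s.startswith("http://www."):
--         scheme_len = 11
--     else:
--         return s
--     rest = s[scheme_len:]
--     if rest.startswith("boards.greenhouse.io/") or rest.startswith("job-boards.greenhouse.io/"):
--         return "https://" + rest
--     return s
-- ===== Notes on version B (the rewrite author's own statement) =====
-- stated objective: alternative
-- what changed: replaces the loop over a four-entry full-prefix replacement table with a scheme/host decomposition: strip, detect an http(s) www scheme prefix, test the remainder against the two greenhouse hosts, and rebuild the URL with an https scheme plus the remainder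
import Mathlib
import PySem

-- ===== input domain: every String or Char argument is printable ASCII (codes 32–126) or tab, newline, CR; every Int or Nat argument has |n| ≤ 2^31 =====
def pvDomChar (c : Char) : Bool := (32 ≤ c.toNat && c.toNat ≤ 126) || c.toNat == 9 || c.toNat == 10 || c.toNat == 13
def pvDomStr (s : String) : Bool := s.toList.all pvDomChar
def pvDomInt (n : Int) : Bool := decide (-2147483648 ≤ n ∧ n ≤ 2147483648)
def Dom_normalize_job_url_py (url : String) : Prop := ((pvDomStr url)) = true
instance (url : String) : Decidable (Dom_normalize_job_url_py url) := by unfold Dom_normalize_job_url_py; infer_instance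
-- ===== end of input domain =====

-- B replaces A's loop over a four-entry full-prefix replacement table with a scheme/host
-- decomposition (detect http(s)://www., test the remainder against the two greenhouse hosts);
-- alternative structure, same cost.


-- ===== PORT A =====
-- the for-loop over replacements.items(), with early return on the first matching prefix
def pvALoop (normalized : List Char) : List (List Char × List Char) → List Char
  | [] => normalized
  | (old, new) :: rest =>
    if PySem.Chars.startswith normalized old then
      new ++ PySem.Chars.slice normalized (some (old.length : Int)) none
    else pvALoop normalized rest

def normalize_job_url_py (url : String) : String :=
  let replacements : List (List Char × List Char) :=
    [("https://www.boards.greenhouse.io/".toList, "https://boards.greenhouse.io/".toList),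
     ("http://www.boards.greenhouse.io/".toList, "https://boards.greenhouse.io/".toList),
     ("https://www.job-boards.greenhouse.io/".toList, "https://job-boards.greenhouse.io/".toList),
     ("http://www.job-boards.greenhouse.io/".toList, "https://job-boards.greenhouse.io/".toList)]
  String.ofList (pvALoop (PySem.Chars.strip url.toList) replacements)

-- ===== PORT B =====
-- B's body on the stripped character list: scheme detection, then host test on the remainder
def pvBBody (s : List Char) : List Char :=
  let schemeLen? : Option Nat :=
    if PySem.Chars.startswith s "https://www.".toList then some 12
    else if PySem.Chars.startswith s "http://www.".toList then some 11
    else none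
  match schemeLen? with
  | none => s
  | some n =>
    let rest := PySem.Chars.slice s (some (n : Int)) none
    if PySem.Chars.startswith rest "boards.greenhouse.io/".toList
        || PySem.Chars.startswith rest "job-boards.greenhouse.io/".toList then
      "https://".toList ++ rest
    else s

def normalize_job_url_py_alt (url : String) : String :=
  String.ofList (pvBBody (PySem.Chars.strip url.toList))

-- ===== PRECONDITION & SPEC =====
def Spec_normalize_job_url_py (url : String) (out : String) : Prop := out = normalize_job_url_py_alt url
instance (url : String) (out : String) : Decidable (Spec_normalize_job_url_py url out) := by unfold Spec_normalize_job_url_py; infer_instance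

-- ===== CLAIM (what is proved, stated in full; the proofs are below) =====
def Claim_equal_normalize_job_url_py : Prop := ∀ (url : String), Dom_normalize_job_url_py url → Spec_normalize_job_url_py url (normalize_job_url_py url)

-- ===== LEMMAS AND PROOFS =====

-- (a ++ b) is a prefix of t iff a is, and b is a prefix of what remains after a
theorem pvPrefixSplit (a b t : List Char) :
    (a ++ b) <+: t ↔ a <+: t ∧ b <+: t.drop a.length := by
  constructor
  · rintro ⟨r, rfl⟩
    exact ⟨⟨b ++ r, by simp⟩, ⟨r, by simp [List.drop_left']⟩⟩
  · rintro ⟨⟨u, rfl⟩, hb⟩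
    rw [List.drop_left] at hb
    obtain ⟨r, rfl⟩ := hb
    exact ⟨r, by simp⟩

theorem pvMain (t : List Char) :
    pvALoop t
      [("https://www.boards.greenhouse.io/".toList, "https://boards.greenhouse.io/".toList),
       ("http://www.boards.greenhouse.io/".toList, "https://boards.greenhouse.io/".toList),
       ("https://www.job-boards.greenhouse.io/".toList, "https://job-boards.greenhouse.io/".toList),
       ("http://www.job-boards.greenhouse.io/".toList, "https://job-boards.greenhouse.io/".toList)]
      = pvBBody t := by
  by_cases c1 : "https://www.".toList <+: t
  · obtain ⟨u, rfl⟩ := c1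
    by_cases d1 : "boards.greenhouse.io/".toList <+: u
    · obtain ⟨r, rfl⟩ := d1
      simp [pvALoop, pvBBody, PySem.Chars.startswith, List.isPrefixOf, PySem.List.slice_from]
    · by_cases d2 : "job-boards.greenhouse.io/".toList <+: u
      · obtain ⟨r, rfl⟩ := d2
        simp [pvALoop, pvBBody, PySem.Chars.startswith, List.isPrefixOf, PySem.List.slice_from]
      · simp at d1 d2
        simp [pvALoop, pvBBody, PySem.Chars.startswith, List.isPrefixOf, PySem.List.slice_from, d1, d2]
  · by_cases c2 : "http://www.".toList <+: t
    · obtain ⟨u, rfl⟩ := c2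
      by_cases d1 : "boards.greenhouse.io/".toList <+: u
      · obtain ⟨r, rfl⟩ := d1
        simp [pvALoop, pvBBody, PySem.Chars.startswith, List.isPrefixOf, PySem.List.slice_from]
      · by_cases d2 : "job-boards.greenhouse.io/".toList <+: u
        · obtain ⟨r, rfl⟩ := d2
          simp [pvALoop, pvBBody, PySem.Chars.startswith, List.isPrefixOf, PySem.List.slice_from]
        · simp at d1 d2
          simp [pvALoop, pvBBody, PySem.Chars.startswith, List.isPrefixOf, PySem.List.slice_from, d1, d2]
    · have n1 : PySem.Chars.startswith t "https://www.".toList = false := by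
        rw [Bool.eq_false_iff]; intro h
        exact c1 ((PySem.Chars.startswith_iff _ _).1 h)
      have n2 : PySem.Chars.startswith t "http://www.".toList = false := by
        rw [Bool.eq_false_iff]; intro h
        exact c2 ((PySem.Chars.startswith_iff _ _).1 h)
      have a1 : PySem.Chars.startswith t "https://www.boards.greenhouse.io/".toList = false := by
        rw [Bool.eq_false_iff]; intro h
        exact c1 (((pvPrefixSplit "https://www.".toList "boards.greenhouse.io/".toList t).1
          ((PySem.Chars.startswith_iff _ _).1 h)).1)
      have a2 : PySem.Chars.startswith t "http://www.boards.greenhouse.io/".toList = false := by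
        rw [Bool.eq_false_iff]; intro h
        exact c2 (((pvPrefixSplit "http://www.".toList "boards.greenhouse.io/".toList t).1
          ((PySem.Chars.startswith_iff _ _).1 h)).1)
      have a3 : PySem.Chars.startswith t "https://www.job-boards.greenhouse.io/".toList = false := by
        rw [Bool.eq_false_iff]; intro h
        exact c1 (((pvPrefixSplit "https://www.".toList "job-boards.greenhouse.io/".toList t).1
          ((PySem.Chars.startswith_iff _ _).1 h)).1)
      have a4 : PySem.Chars.startswith t "http://www.job-boards.greenhouse.io/".toList = false := by
        rw [Bool.eq_false_iff]; intro h
        exact c2 (((pvPrefixSplit "http://www.".toList "job-boards.greenhouse.io/".toList t).1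
          ((PySem.Chars.startswith_iff _ _).1 h)).1)
      simp at a1 a2 a3 a4 n1 n2
      simp [pvALoop, pvBBody, a1, a2, a3, a4, n1, n2]

-- ===== VERDICT (by name: the statement is the Claim_ definition above) =====
theorem normalize_job_url_py_spec : Claim_equal_normalize_job_url_py := by
  intro url _
  exact congrArg String.ofList (pvMain _)
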